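-- pv_equiv track=rewrite | github.com/calvertjadon/advent-of-code | 2023/src/aoc2023/day2.py | sum_possible_game_ids
-- ===== SOURCE A (Python) =====
-- def check_game_is_possible(round_details: str, available: dict[str, int]) -> bool:
--     for round in round_details.split(";"):
--         dice_sets = round.strip().split(", ")
--
--         for dice_set in dice_sets:
--             quantity, color = dice_set.split(" ")
--             quantity = int(quantity)
--
--             if available[color] < quantity:
--                 return False
--
--     return True
--
-- def sum_possible_game_ids(game_records: list[str], bag: dict[str, int]):
--     games = {True: [], False: []}
--
--     for line in game_records:
--         game_details, round_details = line.split(":")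
--
--         _, game_id = game_details.split(" ")
--         game_id = int(game_id)
--
--         result = check_game_is_possible(round_details, available={**bag})
--         games[result].append(game_id)
--
--     return sum(games[True])
-- ===== SOURCE B (Python) =====
-- def sum_possible_game_ids(game_records: list[str], bag: dict[str, int]):
--     total = 0
--     for line in game_records:
--         header, rounds = line.split(":")
--         game_id = int(header.split(" ")[1])
--         reqs: dict[str, int] = {}
--         for part in rounds.split(";"):
--             for chunk in part.strip().split(", "):
--                 quantity, color = chunk.split(" ")
--                 quantity = int(quantity)
--                 reqs[color] = max(reqs.get(color, quantity), quantity)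
--         if all([bag[color] >= quantity for color, quantity in reqs.items()]):
--             total += game_id
--     return total
-- ===== Notes on version B (the rewrite author's own statement) =====
-- stated objective: alternative
-- what changed: B replaces A's interleaved early-return feasibility check and True/False bucket dict with a two-phase per-game pass: it first builds a per-color maximum-requirement dict across all cube sets, then checks every requirement against the bag, accumulating the game id directly into a running total.
-- outside the precondition, e.g. on sum_possible_game_ids(['Game 1: 99 red; x'], {'red': 1}): A returns 0, B raises ValueError; on sum_possible_game_ids(['Game 1: 99 red, 1 blue'], {'red': 1}): A returns 0, B raises KeyError
import Mathlib
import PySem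

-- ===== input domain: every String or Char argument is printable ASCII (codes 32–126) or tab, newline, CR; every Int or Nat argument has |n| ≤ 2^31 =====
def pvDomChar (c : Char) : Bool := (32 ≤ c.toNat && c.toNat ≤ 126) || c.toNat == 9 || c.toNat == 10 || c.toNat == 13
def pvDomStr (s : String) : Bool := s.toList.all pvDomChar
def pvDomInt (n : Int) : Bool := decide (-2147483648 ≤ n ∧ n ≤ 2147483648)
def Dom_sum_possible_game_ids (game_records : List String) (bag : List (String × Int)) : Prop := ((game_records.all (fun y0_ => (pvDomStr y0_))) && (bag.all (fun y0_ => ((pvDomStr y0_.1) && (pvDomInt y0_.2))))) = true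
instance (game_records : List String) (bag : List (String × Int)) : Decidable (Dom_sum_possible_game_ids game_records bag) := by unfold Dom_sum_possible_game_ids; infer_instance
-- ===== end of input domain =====

-- B replaces A's interleaved early-return check + True/False bucket dict by a per-game
-- max-requirement dict checked against the bag, accumulating ids into a running total
-- (objective: alternative, same cost).


-- ===== PORT A =====
-- inner loop of check_game_is_possible: 'for dice_set in dice_sets: …' with early 'return False'
def pvACheckSets (bagd : PySem.Dict String Int) : List String → Option Bool
  | [] => some true
  | ds :: rest =>
    match PySem.Str.split? ds " " with
    | some [qs, cs] =>
      match PySem.Int.ofStr? qs with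
      | some q =>
        match bagd.get? cs with            -- available[color]; KeyError = none
        | some v => if v < q then some false else pvACheckSets bagd rest
        | none => none
      | none => none                        -- int(quantity) ValueError
    | _ => none                             -- unpack ValueError

-- outer loop of check_game_is_possible: 'for round in round_details.split(";")'
def pvACheckRounds (bagd : PySem.Dict String Int) : List String → Option Bool
  | [] => some true
  | r :: rest =>
    match PySem.Str.split? (PySem.Str.strip r) ", " with
    | some dice_sets =>
      match pvACheckSets bagd dice_sets with
      | some true => pvACheckRounds bagd rest
      | some false => some false
      | none => none
    | none => none

-- 'for line in game_records' building games = {True: [], False: []}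
def pvALoop (bagd : PySem.Dict String Int) :
    List String → PySem.Dict Bool (List Int) → Option (PySem.Dict Bool (List Int))
  | [], games => some games
  | line :: rest, games =>
    match PySem.Str.split? line ":" with
    | some [gd, rd] =>
      match PySem.Str.split? gd " " with
      | some [_, gidStr] =>
        match PySem.Int.ofStr? gidStr with
        | some gid =>
          match PySem.Str.split? rd ";" with
          | some rounds =>
            match pvACheckRounds bagd rounds with
            | some res => pvALoop bagd rest (games.modify res [] (· ++ [gid]))
            | none => none
          | none => none
        | none => none
      | _ => none                           -- header unpack ValueError
    | _ => none                             -- ':' unpack ValueError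

def sum_possible_game_ids (game_records : List String) (bag : List (String × Int)) : Int :=
  match pvALoop (PySem.Dict.ofList bag) game_records
      (PySem.Dict.ofList [(true, []), (false, [])]) with
  | some games => (games.getD true []).sum
  | none => 0                               -- unreachable under Pre_

-- ===== PORT B =====
-- inner loop of B: fold the chunks of one semicolon part into the max-requirement dict
def pvBReqsChunks (d : PySem.Dict String Int) : List String → Option (PySem.Dict String Int)
  | [] => some d
  | ch :: rest =>
    match PySem.Str.split? ch " " with
    | some [qs, cs] =>
      match PySem.Int.ofStr? qs with
      | some q => pvBReqsChunks (d.insert cs (max (d.getD cs q) q)) rest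
      | none => none
    | _ => none

def pvBReqsRounds (d : PySem.Dict String Int) : List String → Option (PySem.Dict String Int)
  | [] => some d
  | part :: rest =>
    match PySem.Str.split? (PySem.Str.strip part) ", " with
    | some chunks =>
      match pvBReqsChunks d chunks with
      | some d' => pvBReqsRounds d' rest
      | none => none
    | none => none

-- 'all([bag[color] >= quantity for color, quantity in reqs.items()])' (eager list, then all)
def pvBCheckAll (bagd : PySem.Dict String Int) : List (String × Int) → Option Bool
  | [] => some true
  | (c, q) :: rest =>
    match bagd.get? c with
    | some v => (pvBCheckAll bagd rest).map (fun b => (decide (q ≤ v)) && b)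
    | none => none                          -- bag[color] KeyError

def pvBLoop (bagd : PySem.Dict String Int) : List String → Int → Option Int
  | [], total => some total
  | line :: rest, total =>
    match PySem.Str.split? line ":" with
    | some [header, rounds] =>
      match PySem.Str.split? header " " with
      | some hparts =>
        match PySem.List.pyGet? hparts 1 with   -- header.split(" ")[1]
        | some gidStr =>
          match PySem.Int.ofStr? gidStr with
          | some gid =>
            match pvBReqsRounds PySem.Dict.empty (PySem.Str.split? rounds ";" |>.getD []) with
            | some reqs =>
              match pvBCheckAll bagd reqs.items with
              | some ok => pvBLoop bagd rest (if ok then total + gid else total)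
              | none => none
            | none => none
          | none => none
        | none => none
      | none => none
    | _ => none

def sum_possible_game_ids_alt (game_records : List String) (bag : List (String × Int)) : Int :=
  match pvBLoop (PySem.Dict.ofList bag) game_records 0 with
  | some t => t
  | none => 0                               -- unreachable under Pre_

-- ===== PRECONDITION & SPEC =====
-- one 'quantity color' chunk is well formed and its color is a key of the bag
def pvWfChunk (bagd : PySem.Dict String Int) (ch : String) : Bool :=
  match PySem.Str.split? ch " " with
  | some [qs, cs] => (PySem.Int.ofStr? qs).isSome && bagd.contains cs
  | _ => false

def pvWfRound (bagd : PySem.Dict String Int) (r : String) : Bool :=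
  match PySem.Str.split? (PySem.Str.strip r) ", " with
  | some chunks => chunks.all (pvWfChunk bagd)
  | none => false

def pvWfLine (bagd : PySem.Dict String Int) (line : String) : Bool :=
  match PySem.Str.split? line ":" with
  | some [gd, rd] =>
    (match PySem.Str.split? gd " " with
     | some [_, gidStr] => (PySem.Int.ofStr? gidStr).isSome
     | _ => false)
    && (match PySem.Str.split? rd ";" with
        | some parts => parts.all (pvWfRound bagd)
        | none => false)
  | _ => false

-- Pre_ excludes the malformed inputs on which A raises (bad ':' / header / chunk shape,
-- unparsable int, unknown color), and with them the inputs where A still returns only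
-- because its early 'return False' skips malformed text or an unknown color later in the
-- same game — there B naturally raises while parsing/checking the whole game.
def Pre_sum_possible_game_ids (game_records : List String) (bag : List (String × Int)) : Prop :=
  game_records.all (pvWfLine (PySem.Dict.ofList bag)) = true

instance (game_records : List String) (bag : List (String × Int)) :
    Decidable (Pre_sum_possible_game_ids game_records bag) := by
  unfold Pre_sum_possible_game_ids; infer_instance

def pvWitness_sum_possible_game_ids : List String × (List (String × Int)) :=
  (["Game 1: 3 red, 2 blue; 1 red", "Game 2: 9 red"], [("red", 4), ("blue", 2)])

def Spec_sum_possible_game_ids (game_records : List String) (bag : List (String × Int)) (out : Int) : Prop := out = sum_possible_game_ids_alt game_records bag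
instance (game_records : List String) (bag : List (String × Int)) (out : Int) : Decidable (Spec_sum_possible_game_ids game_records bag out) := by unfold Spec_sum_possible_game_ids; infer_instance

-- ===== CLAIM (what is proved, stated in full; the proofs are below) =====
def Claim_equal_sum_possible_game_ids : Prop := ∀ (game_records : List String) (bag : List (String × Int)), Dom_sum_possible_game_ids game_records bag → Pre_sum_possible_game_ids game_records bag → Spec_sum_possible_game_ids game_records bag (sum_possible_game_ids game_records bag)

-- ===== LEMMAS AND PROOFS =====

-- proof-side views of one parsed 'quantity color' chunk and of the predicates both sides check
def pvParse? (ch : String) : Option (Int × String) :=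
  match PySem.Str.split? ch " " with
  | some [qs, cs] => (PySem.Int.ofStr? qs).map (fun q => (q, cs))
  | _ => none

def pvPairs (l : List String) : List (Int × String) :=
  l.map (fun ch => (pvParse? ch).getD (0, ""))

def pvP (bagd : PySem.Dict String Int) (p : Int × String) : Bool := decide (p.1 ≤ bagd.getD p.2 0)
def pvQ (bagd : PySem.Dict String Int) (p : String × Int) : Bool := decide (p.2 ≤ bagd.getD p.1 0)
def pvStep (d : PySem.Dict String Int) (p : Int × String) : PySem.Dict String Int :=
  d.insert p.2 (max (d.getD p.2 p.1) p.1)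
def pvChunks (r : String) : List String := (PySem.Str.split? (PySem.Str.strip r) ", ").getD []
def pvRoundOK (bagd : PySem.Dict String Int) (r : String) : Bool :=
  (pvPairs (pvChunks r)).all (pvP bagd)
def pvLinePairs (rs : List String) : List (Int × String) := rs.flatMap (fun r => pvPairs (pvChunks r))

lemma pvWfChunk_raw {bagd : PySem.Dict String Int} {ch : String} (h : pvWfChunk bagd ch = true) :
    ∃ qs cs q, PySem.Str.split? ch " " = some [qs, cs] ∧ PySem.Int.ofStr? qs = some q ∧
      bagd.contains cs = true := by
  unfold pvWfChunk at h
  split at h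
  next qs cs heq =>
    rcases Bool.and_eq_true_iff.mp h with ⟨h1, h2⟩
    rcases Option.isSome_iff_exists.mp h1 with ⟨q, hq⟩
    exact ⟨qs, cs, q, heq, hq, h2⟩
  next => exact absurd h (by simp)

lemma pvParse?_eq {ch qs cs : String} {q : Int}
    (h1 : PySem.Str.split? ch " " = some [qs, cs]) (h2 : PySem.Int.ofStr? qs = some q) :
    pvParse? ch = some (q, cs) := by
  simp [pvParse?, h1, h2]

lemma pvA_sets {bagd : PySem.Dict String Int} :
    ∀ l : List String, (∀ ch ∈ l, pvWfChunk bagd ch = true) →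
      pvACheckSets bagd l = some ((pvPairs l).all (pvP bagd))
  | [], _ => by simp [pvACheckSets, pvPairs]
  | ch :: rest, h => by
    obtain ⟨qs, cs, q, hsp, hq, hc⟩ := pvWfChunk_raw (h ch (List.mem_cons_self ..))
    have hvs : (bagd.get? cs).isSome = true := by
      rw [← PySem.Dict.contains_eq_isSome_get?]; exact hc
    obtain ⟨v, hv⟩ := Option.isSome_iff_exists.mp hvs
    have hgd : bagd.getD cs 0 = v := PySem.Dict.getD_of_get?_eq_some bagd 0 hv
    have hpc2 : pvPairs (ch :: rest) = (q, cs) :: pvPairs rest := by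
      simp [pvPairs, pvParse?_eq hsp hq]
    simp only [pvACheckSets, hsp, hq, hv]
    rw [hpc2, List.all_cons]
    by_cases hlt : v < q
    · have hfalse : pvP bagd (q, cs) = false := by simp only [pvP]; simp [hgd]; omega
      rw [if_pos hlt, hfalse, Bool.false_and]
    · have htrue : pvP bagd (q, cs) = true := by simp only [pvP]; simp [hgd]; omega
      rw [if_neg hlt, htrue, Bool.true_and,
        pvA_sets rest (fun x hx => h x (List.mem_cons_of_mem _ hx))]

lemma pvA_rounds {bagd : PySem.Dict String Int} :
    ∀ rs : List String, (∀ r ∈ rs, pvWfRound bagd r = true) →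
      pvACheckRounds bagd rs = some (rs.all (pvRoundOK bagd))
  | [], _ => by simp [pvACheckRounds]
  | r :: rest, h => by
    have hr := h r (List.mem_cons_self ..)
    unfold pvWfRound at hr
    split at hr
    next chunks heq =>
      have hA := pvA_sets chunks (List.all_eq_true.mp hr)
      have hro : pvRoundOK bagd r = (pvPairs chunks).all (pvP bagd) := by
        unfold pvRoundOK pvChunks; rw [heq]; rfl
      simp only [pvACheckRounds, heq, hA, List.all_cons, hro]
      cases hbv : (pvPairs chunks).all (pvP bagd)
      · simp
      · simpa using pvA_rounds rest (fun x hx => h x (List.mem_cons_of_mem _ hx))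
    next => exact absurd hr (by simp)

lemma pvB_chunks :
    ∀ (l : List String) (d : PySem.Dict String Int) (bagd : PySem.Dict String Int),
      (∀ ch ∈ l, pvWfChunk bagd ch = true) →
      pvBReqsChunks d l = some ((pvPairs l).foldl pvStep d)
  | [], _, _, _ => by simp [pvBReqsChunks, pvPairs]
  | ch :: rest, d, bagd, h => by
    obtain ⟨qs, cs, q, hsp, hq, _⟩ := pvWfChunk_raw (h ch (List.mem_cons_self ..))
    have hpc2 : pvPairs (ch :: rest) = (q, cs) :: pvPairs rest := by
      simp [pvPairs, pvParse?_eq hsp hq]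
    simp only [pvBReqsChunks, hsp, hq]
    rw [pvB_chunks rest _ bagd (fun x hx => h x (List.mem_cons_of_mem _ hx)),
      hpc2, List.foldl_cons]
    rfl

lemma pvB_rounds {bagd : PySem.Dict String Int} :
    ∀ (rs : List String) (d : PySem.Dict String Int),
      (∀ r ∈ rs, pvWfRound bagd r = true) →
      pvBReqsRounds d rs = some ((pvLinePairs rs).foldl pvStep d)
  | [], d, _ => by simp [pvBReqsRounds, pvLinePairs]
  | r :: rest, d, h => by
    have hr := h r (List.mem_cons_self ..)
    unfold pvWfRound at hr
    split at hr
    next chunks heq =>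
      have hch : pvChunks r = chunks := by unfold pvChunks; rw [heq]; rfl
      have hB := pvB_chunks chunks d bagd (List.all_eq_true.mp hr)
      simp only [pvBReqsRounds, heq, hB]
      rw [pvB_rounds rest _ (fun x hx => h x (List.mem_cons_of_mem _ hx))]
      simp [pvLinePairs, hch, List.foldl_append]
    next => exact absurd hr (by simp)

lemma pvCheckAll_eq {bagd : PySem.Dict String Int} :
    ∀ items : List (String × Int), (∀ p ∈ items, bagd.contains p.1 = true) →
      pvBCheckAll bagd items = some (items.all (pvQ bagd))
  | [], _ => by simp [pvBCheckAll]
  | (c, q) :: t, h => by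
    have hvs : (bagd.get? c).isSome = true := by
      rw [← PySem.Dict.contains_eq_isSome_get?]; exact h (c, q) (List.mem_cons_self ..)
    obtain ⟨v, hv⟩ := Option.isSome_iff_exists.mp hvs
    have hgd : bagd.getD c 0 = v := PySem.Dict.getD_of_get?_eq_some bagd 0 hv
    simp only [pvBCheckAll, hv]
    rw [pvCheckAll_eq t (fun x hx => h x (List.mem_cons_of_mem _ hx))]
    simp [pvQ, hgd]

lemma pvMap_flip_all {bagd : PySem.Dict String Int} (c : String) (w q : Int) :
    ∀ ls : List (String × Int), (ls.map Prod.fst).Nodup → (c, w) ∈ ls →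
      ((ls.map (fun p => if p.1 == c then (c, max w q) else p)).all (pvQ bagd))
        = (ls.all (pvQ bagd) && decide (q ≤ bagd.getD c 0))
  | [], _, hm => by cases hm
  | p :: t, hnd, hm => by
    rw [List.map_cons] at hnd
    rcases List.nodup_cons.mp hnd with ⟨hnin, hndt⟩
    by_cases hpc : p.1 = c
    · have hp : p = (c, w) := by
        rcases List.mem_cons.mp hm with hm1 | hm1
        · exact hm1.symm
        · exact absurd (List.mem_map.mpr ⟨(c, w), hm1, rfl⟩) (hpc ▸ hnin)
      subst hp
      have hninc : c ∉ t.map Prod.fst := hnin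
      have ht : t.map (fun p => if p.1 == c then ((c, max w q) : String × Int) else p) = t := by
        rw [List.map_congr_left (g := id) ?_, List.map_id]
        intro x hx
        have hxc : x.1 ≠ c := fun hxc => hninc (List.mem_map.mpr ⟨x, hx, hxc⟩)
        simp [hxc]
      have hmax : pvQ bagd (c, max w q) = (pvQ bagd (c, w) && decide (q ≤ bagd.getD c 0)) := by
        simp [pvQ, Bool.decide_and]
      have hif : (if (((c, w) : String × Int).1 == c) = true
          then ((c, max w q) : String × Int) else (c, w)) = (c, max w q) := by simp
      rw [List.map_cons, ht, List.all_cons, List.all_cons, hif, hmax]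
      cases pvQ bagd (c, w) <;> cases t.all (pvQ bagd) <;>
        cases decide (q ≤ bagd.getD c 0) <;> rfl
    · have hm' : (c, w) ∈ t := by
        rcases List.mem_cons.mp hm with hm1 | hm1
        · exact absurd (congrArg Prod.fst hm1.symm) hpc
        · exact hm1
      have hne : (p.1 == c) = false := by simpa using hpc
      have ihe := pvMap_flip_all (bagd := bagd) c w q t hndt hm'
      have hif : (if (p.1 == c) = true then ((c, max w q) : String × Int) else p) = p := by
        simp [hne]
      rw [List.map_cons, List.all_cons, List.all_cons, hif, ihe, Bool.and_assoc]

lemma pvCrux {bagd : PySem.Dict String Int} (d : PySem.Dict String Int)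
    (hnd : d.keys.Nodup) (q : Int) (c : String) :
    ((pvStep d (q, c)).items.all (pvQ bagd)) = (d.items.all (pvQ bagd) && pvP bagd (q, c)) := by
  show ((d.insert c (max (d.getD c q) q)).items.all (pvQ bagd))
    = (d.items.all (pvQ bagd) && decide (q ≤ bagd.getD c 0))
  by_cases hc : d.contains c = true
  · have hvs : (d.get? c).isSome = true := by
      rw [← PySem.Dict.contains_eq_isSome_get?]; exact hc
    obtain ⟨w, hw⟩ := Option.isSome_iff_exists.mp hvs
    have hgd : d.getD c q = w := PySem.Dict.getD_of_get?_eq_some d q hw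
    have hitems : (d.insert c (max w q)).items
        = d.items.map (fun p => if p.1 == c then (c, max w q) else p) := by
      rw [PySem.Dict.items_insert]; simp [hc]
    rw [hgd, hitems]
    exact pvMap_flip_all c w q d.items (by simpa [PySem.Dict.keys] using hnd)
      (PySem.Dict.mem_items_of_get?_eq_some _ hw)
  · have hc' : d.contains c = false := by simpa using hc
    have hgd : d.getD c q = q := PySem.Dict.getD_of_not_contains d q hc'
    have hitems : (d.insert c q).items = d.items ++ [(c, q)] := by
      rw [PySem.Dict.items_insert]; simp [hc']
    rw [hgd, max_self, hitems]
    simp [List.all_append, pvQ]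

lemma pvFold_all {bagd : PySem.Dict String Int} :
    ∀ (L : List (Int × String)) (d : PySem.Dict String Int), d.keys.Nodup →
      ((L.foldl pvStep d).items.all (pvQ bagd)) = (d.items.all (pvQ bagd) && L.all (pvP bagd))
  | [], d, _ => by simp
  | (q, c) :: t, d, hnd => by
    have h2 := pvFold_all (bagd := bagd) t (pvStep d (q, c))
      (by unfold pvStep; exact PySem.Dict.nodup_keys_insert _ _ _ hnd)
    simp only [List.foldl_cons, h2, pvCrux d hnd q c, List.all_cons, Bool.and_assoc]

lemma pvReqs_contains {bagd : PySem.Dict String Int} :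
    ∀ (L : List (Int × String)) (d : PySem.Dict String Int),
      (∀ p ∈ d.items, bagd.contains p.1 = true) → (∀ p ∈ L, bagd.contains p.2 = true) →
      ∀ p ∈ (L.foldl pvStep d).items, bagd.contains p.1 = true
  | [], _, hd, _, p, hp => hd p hp
  | (q, c) :: t, d, hd, hL, p, hp => by
    refine pvReqs_contains t (pvStep d (q, c)) ?_
      (fun x hx => hL x (List.mem_cons_of_mem _ hx)) p hp
    intro x hx
    simp only [pvStep] at hx
    rcases (PySem.Dict.mem_items_insert _ _ _ _).mp hx with h | h
    · rw [h]; exact hL (q, c) (List.mem_cons_self ..)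
    · exact hd x h.1

lemma pvPairs_contains {bagd : PySem.Dict String Int} (l : List String)
    (h : ∀ ch ∈ l, pvWfChunk bagd ch = true) :
    ∀ p ∈ pvPairs l, bagd.contains p.2 = true := by
  intro p hp
  rcases List.mem_map.mp hp with ⟨ch, hch, rfl⟩
  obtain ⟨qs, cs, q, hsp, hq, hc⟩ := pvWfChunk_raw (h ch hch)
  rw [pvParse?_eq hsp hq]
  exact hc

lemma pvLinePairs_contains {bagd : PySem.Dict String Int} (parts : List String)
    (h : ∀ r ∈ parts, pvWfRound bagd r = true) :
    ∀ p ∈ pvLinePairs parts, bagd.contains p.2 = true := by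
  intro p hp
  rcases List.mem_flatMap.mp hp with ⟨r, hr, hpr⟩
  have hwr := h r hr
  unfold pvWfRound at hwr
  split at hwr
  next chunks heq =>
    have hch : pvChunks r = chunks := by unfold pvChunks; rw [heq]; rfl
    exact pvPairs_contains chunks (List.all_eq_true.mp hwr) p (by rwa [hch] at hpr)
  next => exact absurd hwr (by simp)

lemma pvGame_eq {bagd : PySem.Dict String Int} (parts : List String)
    (h : ∀ r ∈ parts, pvWfRound bagd r = true) :
    ∃ b, pvACheckRounds bagd parts = some b ∧
      ∃ reqs, pvBReqsRounds PySem.Dict.empty parts = some reqs ∧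
        pvBCheckAll bagd reqs.items = some b := by
  refine ⟨parts.all (pvRoundOK bagd), pvA_rounds parts h,
    (pvLinePairs parts).foldl pvStep PySem.Dict.empty, pvB_rounds parts _ h, ?_⟩
  have hcont : ∀ p ∈ ((pvLinePairs parts).foldl pvStep PySem.Dict.empty).items,
      bagd.contains p.1 = true := by
    refine pvReqs_contains _ _ ?_ (pvLinePairs_contains parts h)
    intro p hp
    rw [show (PySem.Dict.empty : PySem.Dict String Int).items = [] from rfl] at hp
    cases hp
  rw [pvCheckAll_eq _ hcont,
    pvFold_all _ _ (by exact PySem.Dict.nodup_keys_empty),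
    show (PySem.Dict.empty : PySem.Dict String Int).items = [] from rfl]
  simp only [List.all_nil, Bool.true_and]
  rw [show pvLinePairs parts = parts.flatMap (fun r => pvPairs (pvChunks r)) from rfl,
    List.all_flatMap]
  rfl

lemma pvTop_loop {bagd : PySem.Dict String Int} :
    ∀ (gr : List String), (∀ line ∈ gr, pvWfLine bagd line = true) →
      ∀ (games : PySem.Dict Bool (List Int)) (t : Int),
      ∃ (S : Int) (g' : PySem.Dict Bool (List Int)),
        pvALoop bagd gr games = some g' ∧
        (g'.getD true []).sum = (games.getD true []).sum + S ∧
        pvBLoop bagd gr t = some (t + S)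
  | [], _, games, t => ⟨0, games, rfl, by simp, by simp [pvBLoop]⟩
  | line :: rest, h, games, t => by
    have hl := h line (List.mem_cons_self ..)
    unfold pvWfLine at hl
    split at hl
    next gd rd heq1 =>
      rcases Bool.and_eq_true_iff.mp hl with ⟨hhd, hrds⟩
      split at hhd
      next x gidStr heq2 =>
        obtain ⟨gid, hgid⟩ := Option.isSome_iff_exists.mp hhd
        split at hrds
        next parts heq3 =>
          have hwfparts : ∀ r ∈ parts, pvWfRound bagd r = true := List.all_eq_true.mp hrds
          obtain ⟨b, hA, reqs, hB1, hB2⟩ := pvGame_eq parts hwfparts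
          obtain ⟨S, g', hArec, hsum, hBrec⟩ := pvTop_loop rest
            (fun y hy => h y (List.mem_cons_of_mem _ hy))
            (games.modify b [] (· ++ [gid])) (if b then t + gid else t)
          refine ⟨(if b then gid else 0) + S, g', ?_, ?_, ?_⟩
          · simp only [pvALoop, heq1, heq2, hgid, heq3, hA]
            exact hArec
          · rw [hsum, PySem.Dict.getD_modify]
            cases b <;> simp [List.sum_append] <;> omega
          · have hpg : PySem.List.pyGet? [x, gidStr] (1 : Int) = some gidStr := rfl
            have hB1' : pvBReqsRounds PySem.Dict.empty
                ((PySem.Str.split? rd ";").getD []) = some reqs := by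
              rw [heq3]; simpa using hB1
            simp only [pvBLoop, heq1, heq2, hpg, hgid, hB1', hB2]
            rw [hBrec]
            cases b <;> simp <;> omega
        next => exact absurd hrds (by simp)
      next => exact absurd hhd (by simp)
    next => exact absurd hl (by simp)

-- ===== VERDICT (by name: the statement is the Claim_ definition above) =====
theorem sum_possible_game_ids_spec : Claim_equal_sum_possible_game_ids := by
  intro gr bag _ hpre
  unfold Pre_sum_possible_game_ids at hpre
  unfold Spec_sum_possible_game_ids sum_possible_game_ids sum_possible_game_ids_alt
  obtain ⟨S, g', hA, hsum, hB⟩ := pvTop_loop (bagd := PySem.Dict.ofList bag) gr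
    (List.all_eq_true.mp hpre) (PySem.Dict.ofList [(true, []), (false, [])]) 0
  rw [hA, hB]
  show (g'.getD true []).sum = 0 + S
  rw [hsum,
    show ((PySem.Dict.ofList [(true, ([] : List Int)), (false, [])]).getD true []) = [] by decide]
  simp
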